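-- pv_equiv track=rewrite | github.com/sidro/excodpy | python-exemple/make_song.py | make_song
-- ===== SOURCE A (Python) =====
-- def make_song(num, word):
--     for i in range(num+1):
--         if num > 1:
--             yield f"{num} bottles of {word} on the wall"
--             num -= 1
--         elif num == 1:
--             yield f"Only {num} bottle of {word} left"
--             num -= 1
--         else:
--             yield f"No more {word}"
-- ===== SOURCE B (Python) =====
-- def make_song(num, word):
--     for n in range(num, 1, -1):
--         yield f"{n} bottles of {word} on the wall"
--     if num >= 1:
--         yield f"Only 1 bottle of {word} left"
--     if num >= 0:
--         yield f"No more {word}"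
-- ===== Notes on version B (the rewrite author's own statement) =====
-- stated objective: simpler
-- what changed: Replaces the counter-mutating loop over range(num+1) with three mutation-free phases: a descending range yields the multi-bottle lines directly, then one guarded singular line and one guarded 'No more' line.
import Mathlib
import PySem

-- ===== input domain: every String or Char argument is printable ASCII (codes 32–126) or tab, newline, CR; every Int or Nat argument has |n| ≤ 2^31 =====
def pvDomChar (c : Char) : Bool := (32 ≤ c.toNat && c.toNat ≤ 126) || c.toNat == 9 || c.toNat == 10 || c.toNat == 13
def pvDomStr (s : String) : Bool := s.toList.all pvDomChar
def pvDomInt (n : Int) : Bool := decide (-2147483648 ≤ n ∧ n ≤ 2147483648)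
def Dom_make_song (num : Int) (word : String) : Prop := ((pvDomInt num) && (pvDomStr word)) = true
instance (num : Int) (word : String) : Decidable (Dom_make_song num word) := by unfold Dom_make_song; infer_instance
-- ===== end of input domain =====

-- ===== PORT A =====
-- B replaces A's counter-mutating loop with three mutation-free phases (same output, same O(n) cost; objective: simpler).
-- Port of A: generator looping i over range(num+1) with a mutated `num` counter (yields collected as a list).
def make_song (num : Int) (word : String) : List String :=
  ((PySem.List.pyRange 0 (num + 1) 1).foldl
    (fun (st : Int × List String) _ =>
      let n := st.1
      let acc := st.2
      if n > 1 then
        (n - 1, acc ++ [PySem.Int.toStr n ++ " bottles of " ++ word ++ " on the wall"])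
      else if n = 1 then
        (n - 1, acc ++ ["Only " ++ PySem.Int.toStr n ++ " bottle of " ++ word ++ " left"])
      else
        (n, acc ++ ["No more " ++ word]))
    (num, [])).2

-- ===== PORT B =====
-- Port of B: three mutation-free phases — descending range of multi-bottle lines, then two guarded lines.
def make_song_alt (num : Int) (word : String) : List String :=
  ((PySem.List.pyRange num 1 (-1)).map
      (fun n => PySem.Int.toStr n ++ " bottles of " ++ word ++ " on the wall"))
    ++ (if num ≥ 1 then ["Only 1 bottle of " ++ word ++ " left"] else [])
    ++ (if num ≥ 0 then ["No more " ++ word] else [])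

-- ===== PRECONDITION & SPEC =====
def Spec_make_song (num : Int) (word : String) (out : List String) : Prop := out = make_song_alt num word
instance (num : Int) (word : String) (out : List String) : Decidable (Spec_make_song num word out) := by unfold Spec_make_song; infer_instance

-- ===== CLAIM (what is proved, stated in full; the proofs are below) =====
def Claim_equal_make_song : Prop := ∀ (num : Int) (word : String), Dom_make_song num word → Spec_make_song num word (make_song num word)

-- ===== LEMMAS AND PROOFS =====

-- The fold body of make_song, as a function of the state only (the range element is ignored).
def msStep (word : String) (st : Int × List String) : Int × List String :=
  if st.1 > 1 then
    (st.1 - 1, st.2 ++ [PySem.Int.toStr st.1 ++ " bottles of " ++ word ++ " on the wall"])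
  else if st.1 = 1 then
    (st.1 - 1, st.2 ++ ["Only " ++ PySem.Int.toStr st.1 ++ " bottle of " ++ word ++ " left"])
  else
    (st.1, st.2 ++ ["No more " ++ word])

-- A fold whose body ignores the list elements is an iterate of the body, length many times.
theorem foldl_const_iterate {α β : Type} (g : α → α) (l : List β) (s : α) :
    l.foldl (fun a _ => g a) s = g^[l.length] s := by
  induction l generalizing s with
  | nil => rfl
  | cons x xs ih => simp [List.foldl, Function.iterate_succ_apply, ih]

-- Countdown range below 2 is empty.
theorem alt_neg (num : Int) (word : String) (h : num < 0) : make_song_alt num word = [] := by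
  unfold make_song_alt
  rw [PySem.List.pyRange_neg_one_eq_nil (by omega)]
  simp [h.not_ge, show ¬ (1:Int) ≤ num by omega]

-- Unfolding B one multi-bottle line at a time, for counters of at least 2.
theorem alt_cons (n : Int) (word : String) (h : 2 ≤ n) :
    make_song_alt n word
      = (PySem.Int.toStr n ++ " bottles of " ++ word ++ " on the wall")
          :: make_song_alt (n - 1) word := by
  unfold make_song_alt
  rw [PySem.List.pyRange_neg_one_cons (show (1:Int) < n by omega)]
  simp [show (1:Int) ≤ n by omega, show (1:Int) ≤ n - 1 by omega,
        show (0:Int) ≤ n by omega]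

-- Core invariant: iterating the loop body n+1 times from counter n appends exactly B's lines.
theorem iter_snd : ∀ (k : Nat) (n : Int) (acc : List String) (word : String),
    (k : Int) = n + 1 → ((msStep word)^[k] (n, acc)).2 = acc ++ make_song_alt n word := by
  intro k
  induction k with
  | zero =>
    intro n acc word h
    have hn : n = -1 := by omega
    subst hn
    simp [alt_neg (-1) word (by omega)]
  | succ k ih =>
    intro n acc word h
    have hn : (k : Int) = n := by push_cast at h ⊢; omega
    rw [Function.iterate_succ_apply]
    rcases lt_trichotomy n 1 with hlt | heq | hgt
    · -- n = 0 (n ≥ 0 from hn), last iteration must be the only one: k = 0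
      have hn0 : n = 0 := by omega
      have hk0 : k = 0 := by omega
      subst hn0; subst hk0
      unfold make_song_alt msStep
      rw [PySem.List.pyRange_neg_one_eq_nil (by omega)]
      simp
    · -- n = 1: the singular line, then the tail handles n = 0
      subst heq
      have hms : msStep word (1, acc)
          = (0, acc ++ ["Only 1 bottle of " ++ word ++ " left"]) := by
        unfold msStep
        have h1 : PySem.Int.toStr 1 = "1" := by decide
        simp [h1]
      rw [hms, ih 0 _ word (by omega)]
      unfold make_song_alt
      rw [PySem.List.pyRange_neg_one_eq_nil (by omega),
          PySem.List.pyRange_neg_one_eq_nil (by omega)]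
      simp
    · -- n ≥ 2: one multi-bottle line, then the tail for n - 1
      have hms : msStep word (n, acc)
          = (n - 1, acc ++ [PySem.Int.toStr n ++ " bottles of " ++ word ++ " on the wall"]) := by
        unfold msStep
        simp [hgt]
      rw [hms, ih (n - 1) _ word (by omega), alt_cons n word (by omega)]
      simp

-- ===== VERDICT (by name: the statement is the Claim_ definition above) =====
theorem make_song_spec : Claim_equal_make_song := by
  intro num word _
  unfold Spec_make_song make_song
  rcases le_or_gt 0 num with hnn | hneg
  · have hfold : (PySem.List.pyRange 0 (num + 1) 1).foldl
        (fun (st : Int × List String) (_ : Int) => msStep word st) (num, [])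
        = (msStep word)^[(PySem.List.pyRange 0 (num + 1) 1).length] (num, []) :=
      foldl_const_iterate (msStep word) _ _
    have hlen : ((PySem.List.pyRange 0 (num + 1) 1).length : Int) = num + 1 := by
      rw [PySem.List.length_pyRange_one]; omega
    have := iter_snd (PySem.List.pyRange 0 (num + 1) 1).length num [] word hlen
    calc ((PySem.List.pyRange 0 (num + 1) 1).foldl
          (fun (st : Int × List String) (_ : Int) => msStep word st) (num, [])).2
        = ((msStep word)^[(PySem.List.pyRange 0 (num + 1) 1).length] (num, [])).2 := by
          rw [hfold]
      _ = make_song_alt num word := by rw [this]; simp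
  · rw [PySem.List.pyRange_one_eq_nil (by omega)]
    simp [alt_neg num word hneg]
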